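-- pv_equiv track=rewrite | github.com/abvss13/Toy-problem | challenge3.py | solve
-- ===== SOURCE A (Python) =====
-- def solve(s):
--     # Function to calculate the value of a consonant substring
--     def substring_value(substring):
--         return sum(ord(char) - ord('a') + 1 for char in substring)
--
--     # Remove vowels from the input string
--     vowels = "aeiou"
--     consonant_string = "".join(char for char in s if char not in vowels)
--
--     # Split the consonant string into substrings
--     substrings = consonant_string.split('a')  # Using 'a' as a separator
--
--     # Calculate the value of each consonant substring
--     values = [substring_value(substring) for substring in substrings]
--
--     # Return the highest value among the consonant substrings
--     return max(values)
-- ===== SOURCE B (Python) =====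
-- def solve(s):
--     # single pass: sum letter-values of non-vowel characters
--     return sum(ord(c) - ord('a') + 1 for c in s if c not in "aeiou")
-- ===== Notes on version B (the rewrite author's own statement) =====
-- stated objective: simpler
-- what changed: B is a single-pass sum of letter-values over non-vowel characters; A's join/split/max pipeline is dropped entirely (the split separator is itself a vowel already removed, so A always takes the max of a one-element list holding that same sum).
import Mathlib
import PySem

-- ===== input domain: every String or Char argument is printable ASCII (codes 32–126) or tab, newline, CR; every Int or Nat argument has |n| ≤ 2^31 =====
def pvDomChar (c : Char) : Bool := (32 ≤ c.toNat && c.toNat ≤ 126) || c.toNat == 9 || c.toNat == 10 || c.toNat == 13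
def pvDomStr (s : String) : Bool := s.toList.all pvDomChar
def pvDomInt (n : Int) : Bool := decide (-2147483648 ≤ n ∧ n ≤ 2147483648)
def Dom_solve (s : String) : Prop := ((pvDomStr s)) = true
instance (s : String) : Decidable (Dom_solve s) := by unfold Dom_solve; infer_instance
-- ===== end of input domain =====

-- B replaces A's join/split/max pipeline (a no-op: the separator is a vowel already removed) by one direct sum; objective: simpler.

-- ===== PORT A =====
-- sum(ord(char) - ord('a') + 1 for char in substring)
def substringValue (sub : String) : Int :=
  (sub.toList.map (fun c => (c.toNat : Int) - ('a'.toNat : Int) + 1)).sum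

def solve (s : String) : Int :=
  let vowels : String := "aeiou"
  let consonant_string : String :=
    String.ofList (s.toList.filter (fun c => !(vowels.toList.contains c)))
  let substrings : List String :=
    match PySem.Str.split? consonant_string "a" with
    | some l => l
    | none => []          -- unreachable: the separator "a" is nonempty
  let values : List Int := substrings.map substringValue
  match PySem.List.max? values (fun x => x) with
  | some m => m
  | none => 0             -- unreachable: split always yields at least one piece

-- ===== PORT B =====
def solve_alt (s : String) : Int :=
  s.toList.foldl
    (fun acc c => if !("aeiou".toList.contains c)
                  then acc + ((c.toNat : Int) - ('a'.toNat : Int) + 1)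
                  else acc) 0

-- ===== PRECONDITION & SPEC =====
def Spec_solve (s : String) (out : Int) : Prop := out = solve_alt s
instance (s : String) (out : Int) : Decidable (Spec_solve s out) := by unfold Spec_solve; infer_instance

-- ===== CLAIM (what is proved, stated in full; the proofs are below) =====
def Claim_equal_solve : Prop := ∀ (s : String), Dom_solve s → Spec_solve s (solve s)

-- ===== LEMMAS AND PROOFS =====

-- splitOn.go on a list not containing the one-char separator never splits
lemma go_no_sep (a : Char) :
    ∀ (l : List Char) (fuel : Nat) (cur' : List Char) (acc : List (List Char)),
      a ∉ l → l.length ≤ fuel →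
      PySem.Chars.splitOn.go [a] fuel l cur' acc =
        ((cur'.reverse ++ l) :: acc).reverse := by
  intro l
  induction l with
  | nil =>
      intro fuel cur' acc _ _
      cases fuel <;> simp [PySem.Chars.splitOn.go]
  | cons c rest ih =>
      intro fuel cur' acc hmem hlen
      cases fuel with
      | zero => simp at hlen
      | succ f =>
          have hc : ¬ (c = a) := by
            intro h; exact hmem (by simp [h])
          have hpre : ([a].isPrefixOf (c :: rest)) = false := by
            simp [List.isPrefixOf]
            intro h; exact absurd h.symm hc
          have hrest : a ∉ rest := fun h => hmem (List.mem_cons_of_mem _ h)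
          have hlen' : rest.length ≤ f := by simpa using hlen
          simp only [PySem.Chars.splitOn.go, hpre]
          rw [ih f (c :: cur') acc hrest hlen']
          simp

lemma splitOn_no_sep (a : Char) (l : List Char) (h : a ∉ l) :
    PySem.Chars.splitOn l [a] = [l] := by
  unfold PySem.Chars.splitOn
  have := go_no_sep a l (l.length + 1) [] [] h (by omega)
  simpa using this

lemma foldl_add_sum (f : Char → Int) :
    ∀ (l : List Char) (init : Int),
      l.foldl (fun acc c => acc + f c) init = init + (l.map f).sum := by
  intro l
  induction l with
  | nil => simp
  | cons c rest ih => intro init; simp [List.foldl, ih]; ring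

-- ===== VERDICT (by name: the statement is the Claim_ definition above) =====
theorem solve_spec : Claim_equal_solve := by
  intro s _
  unfold Spec_solve solve solve_alt
  have hna : 'a' ∉ s.toList.filter (fun c => !("aeiou".toList.contains c)) := by
    intro h
    have := List.of_mem_filter h
    simp at this
  rw [PySem.List.foldl_if_eq_foldl_filter
        (fun c => !("aeiou".toList.contains c))
        (fun acc c => acc + ((c.toNat : Int) - ('a'.toNat : Int) + 1))]
  simp only [PySem.Str.split?, PySem.Chars.split?]
  rw [show (String.ofList (s.toList.filter (fun c => !("aeiou".toList.contains c)))).toList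
        = s.toList.filter (fun c => !("aeiou".toList.contains c)) by simp]
  rw [show ("a" : String).toList = ['a'] by decide]
  rw [splitOn_no_sep 'a' _ hna]
  simp [PySem.List.max?, substringValue, foldl_add_sum]
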